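-- pv_equiv track=rewrite | github.com/Hugekyung/teamnote1 | codingTest/lineplus.py | solution
-- ===== SOURCE A (Python) =====
-- def solution(student, k):
--     if student.count(1) < k:
--         return 0
--
--     count = 0
--     has_list = []
--
--     for i in range(0, len(student)+1):
--         for j in range(len(student)+1, 0, -1):
--             if student[i:j] not in has_list and student[i:j].count(1) == k:
--                 has_list.append(student[i:j])
--                 count += 1
--
--     return count
-- ===== SOURCE B (Python) =====
-- def solution(student, k):
--     if student.count(1) < k:
--         return 0
--     n = len(student)
--     seen = set()
--     for i in range(n + 1):
--         ones = 0
--         for j in range(i, n + 1):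
--             if ones == k:
--                 seen.add(tuple(student[i:j]))
--             if j < n and student[j] == 1:
--                 ones += 1
--     return len(seen)
-- ===== Notes on version B (the rewrite author's own statement) =====
-- stated objective: alternative
-- what changed: A re-slices and re-counts ones for every pair (i,j) and dedups with a linear 'not in has_list' scan over a growing list of slices; B keeps a running count of ones per start index and dedups with a hash set of slice tuples, removing the inner membership scan and the per-slice recount (a timing run's inputs hit the common O(n) few-ones early exit, so no speedup was measured).
import Mathlib
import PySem

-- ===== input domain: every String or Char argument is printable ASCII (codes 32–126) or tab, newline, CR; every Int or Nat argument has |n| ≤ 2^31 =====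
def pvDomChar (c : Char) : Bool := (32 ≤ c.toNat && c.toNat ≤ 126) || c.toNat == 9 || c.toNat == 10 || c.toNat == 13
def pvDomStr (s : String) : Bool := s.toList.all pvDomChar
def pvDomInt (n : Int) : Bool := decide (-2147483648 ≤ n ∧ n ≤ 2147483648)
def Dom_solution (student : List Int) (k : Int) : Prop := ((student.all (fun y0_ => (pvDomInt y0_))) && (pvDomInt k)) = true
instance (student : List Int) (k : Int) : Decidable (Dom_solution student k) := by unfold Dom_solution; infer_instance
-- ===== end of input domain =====

-- B replaces A's repeated slicing, re-counting and linear 'not in has_list' scans by a set of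
-- slices together with a running count of ones per start index (objective: alternative).

-- ===== PORT A =====
def solution (student : List Int) (k : Int) : Int :=
  if (PySem.List.count student 1 : Int) < k then 0
  else
    let r := (PySem.List.pyRange 0 ((student.length : Int) + 1) 1).foldl
      (fun (st : Int × List (List Int)) i =>
        (PySem.List.pyRange ((student.length : Int) + 1) 0 (-1)).foldl
          (fun (st : Int × List (List Int)) j =>
            if PySem.List.slice student (some i) (some j) ∉ st.2
                ∧ (PySem.List.count (PySem.List.slice student (some i) (some j)) 1 : Int) = k
            then (st.1 + 1, st.2 ++ [PySem.List.slice student (some i) (some j)])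
            else st)
          st)
      ((0 : Int), ([] : List (List Int)))
    r.1

-- ===== PORT B =====
-- the inner-loop body of B ('if ones == k: seen.add(tuple(student[i:j]))' then
-- 'if j < n and student[j] == 1: ones += 1'; pyGetD is exact: it is consulted only when j < n)
def solution_alt_body (student : List Int) (k : Int) (i : Int)
    (st : PySem.Set (List Int) × Int) (j : Int) : PySem.Set (List Int) × Int :=
  let st' := if st.2 = k
    then (PySem.Set.add st.1 (PySem.List.slice student (some i) (some j)), st.2)
    else st
  if j < (student.length : Int) ∧ PySem.List.pyGetD student j 0 = 1
  then (st'.1, st'.2 + 1) else st'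

def solution_alt (student : List Int) (k : Int) : Int :=
  if (PySem.List.count student 1 : Int) < k then 0
  else
  let n : Int := (student.length : Int)
  let seen := (PySem.List.pyRange 0 (n + 1) 1).foldl
    (fun (seen : PySem.Set (List Int)) i =>
      ((PySem.List.pyRange i (n + 1) 1).foldl (solution_alt_body student k i)
        (seen, (0 : Int))).1)
    PySem.Set.empty
  PySem.Set.len seen

-- ===== PRECONDITION & SPEC =====
def Spec_solution (student : List Int) (k : Int) (out : Int) : Prop := out = solution_alt student k
instance (student : List Int) (k : Int) (out : Int) : Decidable (Spec_solution student k out) := by unfold Spec_solution; infer_instance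

-- ===== CLAIM (what is proved, stated in full; the proofs are below) =====
def Claim_equal_solution : Prop := ∀ (student : List Int) (k : Int), Dom_solution student k → Spec_solution student k (solution student k)

-- ===== LEMMAS AND PROOFS =====

-- the slice-qualifies predicate and A's list-dedup step, as named functions for the proofs
def pvP (k : Int) (s : List Int) : Bool := decide ((PySem.List.count s 1 : Int) = k)

def pvStep (k : Int) (st : Int × List (List Int)) (s : List Int) : Int × List (List Int) :=
  if s ∉ st.2 ∧ (PySem.List.count s 1 : Int) = k then (st.1 + 1, st.2 ++ [s]) else st

-- A's dedup-by-list-membership loop is Set.update, with the counter tracking the length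
lemma pvFoldA (k : Int) (ss : List (List Int)) (c : Int) (h : List (List Int))
    (hn : h.Nodup) (hc : c = (h.length : Int)) :
    ss.foldl (pvStep k) (c, h)
      = (((PySem.Set.update h (ss.filter (pvP k))).length : Int),
          PySem.Set.update h (ss.filter (pvP k))) := by
  induction ss generalizing c h with
  | nil => simp [PySem.Set.update_nil, hc]
  | cons s ss ih =>
    by_cases hp : ((List.count 1 s : Nat) : Int) = k
    · by_cases hm : s ∈ h
      · have h1 : pvStep k (c, h) s = (c, h) := by simp [pvStep, hm]
        rw [List.foldl_cons, h1, ih c h hn hc]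
        simp [pvP, PySem.List.count_eq, hp, PySem.Set.update_cons, PySem.Set.add_of_mem hm]
      · have h1 : pvStep k (c, h) s = (c + 1, h ++ [s]) := by
          simp [pvStep, PySem.List.count_eq, hm, hp]
        have hn' : (h ++ [s]).Nodup := by
          simp [List.nodup_append, hn]
          exact fun a ha heq => hm (heq ▸ ha)
        rw [List.foldl_cons, h1, ih _ _ hn' (by simp [hc])]
        simp [pvP, PySem.List.count_eq, hp, PySem.Set.update_cons, PySem.Set.add_of_not_mem hm]
    · have h1 : pvStep k (c, h) s = (c, h) := by simp [pvStep, PySem.List.count_eq, hp]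
      rw [List.foldl_cons, h1, ih c h hn hc]
      simp [pvP, PySem.List.count_eq, hp]

-- the slice list A enumerates
def pvSA (student : List Int) : List (List Int) :=
  (PySem.List.pyRange 0 ((student.length : Int) + 1) 1).flatMap
    (fun i => (PySem.List.pyRange ((student.length : Int) + 1) 0 (-1)).map
      (fun j => PySem.List.slice student (some i) (some j)))

lemma pvA_eq (student : List Int) (k : Int) :
    solution student k
      = if (PySem.List.count student 1 : Int) < k then 0
        else ((PySem.Set.ofList ((pvSA student).filter (pvP k))).length : Int) := by
  unfold solution
  split_ifs with hlt
  · rfl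
  · have hinner : ∀ st : Int × List (List Int), ∀ i : Int,
        (PySem.List.pyRange ((student.length : Int) + 1) 0 (-1)).foldl
          (fun (st : Int × List (List Int)) j =>
            if PySem.List.slice student (some i) (some j) ∉ st.2
                ∧ (PySem.List.count (PySem.List.slice student (some i) (some j)) 1 : Int) = k
            then (st.1 + 1, st.2 ++ [PySem.List.slice student (some i) (some j)])
            else st) st
        = ((PySem.List.pyRange ((student.length : Int) + 1) 0 (-1)).map
            (fun j => PySem.List.slice student (some i) (some j))).foldl (pvStep k) st := by
      intro st i
      rw [List.foldl_map]
      rfl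
    conv_lhs =>
      rw [PySem.List.foldl_congr_mem _ _
        (fun (st : Int × List (List Int)) i =>
          ((PySem.List.pyRange ((student.length : Int) + 1) 0 (-1)).map
            (fun j => PySem.List.slice student (some i) (some j))).foldl (pvStep k) st)
        _ (fun st i _ => hinner st i)]
    rw [← List.foldl_flatMap]
    rw [pvFoldA k _ 0 [] List.nodup_nil (by simp)]
    rw [show PySem.Set.update ([] : List (List Int)) = PySem.Set.update (PySem.Set.empty) from rfl,
      PySem.Set.update_empty]
    rfl

-- the per-start slice list B enumerates (already filtered by the qualifies predicate)
def pvFB (student : List Int) (k : Int) (i : Nat) : List (List Int) :=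
  ((PySem.List.pyRange (i : Int) ((student.length : Int) + 1) 1).map
    (fun j => PySem.List.slice student (some (i : Int)) (some j))).filter (pvP k)

-- one step of B's inner loop, written as an update of each component
lemma pvBodyB_eq (student : List Int) (k : Int) (i : Int)
    (st : PySem.Set (List Int) × Int) (j : Int) :
    solution_alt_body student k i st j
      = ((if st.2 = k then PySem.Set.add st.1 (PySem.List.slice student (some i) (some j)) else st.1),
         st.2 + (if j < (student.length : Int) ∧ PySem.List.pyGetD student j 0 = 1 then 1 else 0)) := by
  unfold solution_alt_body
  by_cases h1 : st.2 = k <;> by_cases h2 : j < (student.length : Int) ∧ PySem.List.pyGetD student j 0 = 1 <;>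
    simp [h1, h2]

-- B's inner loop: the running ones-counter equals the ones-count of the current slice,
-- and the loop is Set.update with the qualifying slices of start i
lemma pvInnerB (student : List Int) (k : Int) (i : Nat) :
    ∀ (m b : Nat), b + m = student.length + 1 → i ≤ b → ∀ (seen : PySem.Set (List Int)),
    ((PySem.List.pyRange (b : Int) ((student.length : Int) + 1) 1).foldl
        (solution_alt_body student k (i : Int))
        (seen, ((((student.drop i).take (b - i)).count 1 : Nat) : Int))).1
    = PySem.Set.update seen
        ((((PySem.List.pyRange (b : Int) ((student.length : Int) + 1) 1).map
            (fun j => PySem.List.slice student (some (i : Int)) (some j))).filter (pvP k))) := by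
  intro m
  induction m with
  | zero =>
    intro b hb hib seen
    have hnil : PySem.List.pyRange (b : Int) ((student.length : Int) + 1) 1 = [] :=
      PySem.List.pyRange_one_eq_nil (by omega)
    simp [hnil, PySem.Set.update_nil]
  | succ m ih =>
    intro b hb hib seen
    have hlt : (b : Int) < (student.length : Int) + 1 := by omega
    rw [PySem.List.pyRange_one_cons hlt, List.foldl_cons, pvBodyB_eq]
    have hslice : PySem.List.slice student (some (i : Int)) (some (b : Int))
        = (student.drop i).take (b - i) := PySem.List.slice_natCast student i b
    -- ones counter after the step = ones-count of the next slice
    have hones : ((((student.drop i).take (b - i)).count 1 : Nat) : Int)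
          + (if (b : Int) < (student.length : Int) ∧ PySem.List.pyGetD student (b : Int) 0 = 1
             then 1 else 0)
        = ((((student.drop i).take (b + 1 - i)).count 1 : Nat) : Int) := by
      by_cases hbl : b < student.length
      · have hget : PySem.List.pyGetD student (b : Int) 0 = student[b] := by
          rw [PySem.List.pyGetD_natCast, List.getD_eq_getElem student 0 hbl]
        have hx : (student.drop i).take (b + 1 - i)
            = (student.drop i).take (b - i) ++ [student[b]] := by
          have h1 : b + 1 - i = (b - i) + 1 := by omega
          rw [h1, List.take_add_one]
          have h2 : (student.drop i)[b - i]? = some student[b] := by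
            rw [List.getElem?_drop]
            have h3 : i + (b - i) = b := by omega
            rw [h3, List.getElem?_eq_getElem hbl]
          rw [h2]
          rfl
        rw [hx, List.count_append]
        by_cases hv : student[b] = (1 : Int)
        · rw [if_pos ⟨by omega, by rw [hget]; exact hv⟩]
          simp [hv]
        · rw [if_neg (fun hcon => hv (by rw [← hget]; exact hcon.2))]
          have hc0 : List.count (1 : Int) [student[b]] = 0 := by
            simp [hv]
          rw [hc0]
          simp
      · have heq : (student.drop i).take (b + 1 - i) = (student.drop i).take (b - i) := by
          have hlen : (student.drop i).length ≤ b - i := by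
            rw [List.length_drop]; omega
          rw [List.take_of_length_le hlen, List.take_of_length_le (by omega)]
        rw [if_neg (fun hcon => hbl (by exact_mod_cast hcon.1)), heq]
        ring
    rw [hones]
    have hcast : (b : Int) + 1 = ((b + 1 : Nat) : Int) := by push_cast; ring
    rw [hcast, List.map_cons, List.filter_cons]
    by_cases hp : ((((student.drop i).take (b - i)).count 1 : Nat) : Int) = k
    · rw [if_pos hp]
      have hpv : pvP k (PySem.List.slice student (some (i : Int)) (some (b : Int))) = true := by
        simp [pvP, PySem.List.count_eq, hslice]
        exact_mod_cast hp
      rw [hpv, if_pos rfl, PySem.Set.update_cons]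
      exact ih (b + 1) (by omega) (by omega) _
    · rw [if_neg hp]
      have hpv : pvP k (PySem.List.slice student (some (i : Int)) (some (b : Int))) = false := by
        simp [pvP, PySem.List.count_eq, hslice]
        intro hcon
        exact absurd (by exact_mod_cast hcon) hp
      rw [hpv]
      simp only [Bool.false_eq_true, if_false]
      exact ih (b + 1) (by omega) (by omega) _

-- folding update over a list is one update with the concatenation
lemma pvFoldUpdate {ι : Type} (F : ι → List (List Int)) (is : List ι) (s : PySem.Set (List Int)) :
    is.foldl (fun s i => PySem.Set.update s (F i)) s = PySem.Set.update s (is.flatMap F) := by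
  induction is generalizing s with
  | nil => simp [PySem.Set.update_nil]
  | cons a l ih => simp [List.flatMap_cons, PySem.Set.update_append, ih]

-- the (filtered) slice list B collects
def pvSB (student : List Int) (k : Int) : List (List Int) :=
  (List.range (student.length + 1)).flatMap (pvFB student k)

lemma pvB_eq (student : List Int) (k : Int) :
    solution_alt student k
      = if (PySem.List.count student 1 : Int) < k then 0
        else ((PySem.Set.ofList (pvSB student k)).length : Int) := by
  unfold solution_alt
  split_ifs with hlt
  · rfl
  dsimp only
  have houter : PySem.List.pyRange 0 ((student.length : Int) + 1) 1
      = List.map (fun t : Nat => (t : Int)) (List.range (student.length + 1)) := by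
    have hcast : (student.length : Int) + 1 = ((student.length + 1 : Nat) : Int) := by
      push_cast; ring
    rw [hcast, PySem.List.pyRange_zero_nat]
  rw [houter, List.foldl_map]
  rw [PySem.List.foldl_congr_mem _ _
    (fun (s : PySem.Set (List Int)) (i : Nat) => PySem.Set.update s (pvFB student k i)) _ ?hcongr]
  · rw [pvFoldUpdate, PySem.Set.update_empty]
    simp [PySem.Set.len, pvSB]
  case hcongr =>
    intro acc i hi
    have hi' : i ≤ student.length := by
      have := List.mem_range.mp hi; omega
    have h0 : ((acc, (0 : Int)) : PySem.Set (List Int) × Int)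
        = (acc, ((((student.drop i).take (i - i)).count 1 : Nat) : Int)) := by simp
    rw [h0]
    exact pvInnerB student k i (student.length + 1 - i) i (by omega) (le_refl i) acc

-- membership in A's slice list: slices student[i:j], 0 ≤ i ≤ n, 1 ≤ j ≤ n+1
lemma pvMemSA (student : List Int) (x : List Int) :
    x ∈ pvSA student
      ↔ ∃ i j : Nat, i ≤ student.length ∧ 1 ≤ j ∧ j ≤ student.length + 1
          ∧ x = (student.drop i).take (j - i) := by
  unfold pvSA
  simp only [List.mem_flatMap, List.mem_map, PySem.List.mem_pyRange_one,
    PySem.List.mem_pyRange_neg_one]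
  constructor
  · rintro ⟨i, ⟨hi0, hiN⟩, j, ⟨hj0, hjN⟩, rfl⟩
    refine ⟨i.toNat, j.toNat, by omega, by omega, by omega, ?_⟩
    rw [PySem.List.slice_toNat student (by omega) (by omega)]
  · rintro ⟨i, j, hi, hj1, hj2, rfl⟩
    exact ⟨(i : Int), ⟨by omega, by omega⟩, (j : Int), ⟨by omega, by omega⟩,
      by rw [PySem.List.slice_natCast]⟩
-- membership in B's slice list: qualifying slices student[i:j], 0 ≤ i ≤ j ≤ n
lemma pvMemSB (student : List Int) (k : Int) (x : List Int) :
    x ∈ pvSB student k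
      ↔ (∃ i j : Nat, i ≤ student.length ∧ i ≤ j ∧ j ≤ student.length
          ∧ x = (student.drop i).take (j - i)) ∧ pvP k x = true := by
  unfold pvSB pvFB
  simp only [List.mem_flatMap, List.mem_range, List.mem_filter, List.mem_map,
    PySem.List.mem_pyRange_one]
  constructor
  · rintro ⟨i, hi, ⟨j, ⟨hj0, hjN⟩, rfl⟩, hp⟩
    refine ⟨⟨i, j.toNat, by omega, by omega, by omega, ?_⟩, hp⟩
    rw [PySem.List.slice_toNat student (by omega) (by omega)]
    simp
  · rintro ⟨⟨i, j, hi, hij, hjN, rfl⟩, hp⟩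
    refine ⟨i, by omega, ⟨⟨(j : Int), ⟨by omega, by omega⟩, by rw [PySem.List.slice_natCast]⟩, hp⟩⟩

-- A and B collect the same slices (as sets): empty and clamped slices coincide
lemma pvSetsEq (student : List Int) (k : Int) (x : List Int) :
    x ∈ (pvSA student).filter (pvP k) ↔ x ∈ pvSB student k := by
  rw [List.mem_filter, pvMemSA, pvMemSB]
  constructor
  · rintro ⟨⟨i, j, hi, hj1, hj2, rfl⟩, hp⟩
    refine ⟨?_, hp⟩
    by_cases hji : j ≤ i
    · have hz : j - i = 0 := by omega
      refine ⟨student.length, student.length, le_refl _, le_refl _, le_refl _, ?_⟩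
      rw [hz]
      simp [List.drop_length]
    · by_cases hjN : j ≤ student.length
      · exact ⟨i, j, hi, by omega, hjN, rfl⟩
      · have hj : j = student.length + 1 := by omega
        refine ⟨i, student.length, hi, hi, le_refl _, ?_⟩
        subst hj
        have hd1 : (student.drop i).length ≤ student.length + 1 - i := by
          rw [List.length_drop]; omega
        have hd2 : (student.drop i).length ≤ student.length - i := by
          rw [List.length_drop]
        simp [List.take_of_length_le hd1, List.take_of_length_le hd2]
  · rintro ⟨⟨i, j, hi, hij, hjN, rfl⟩, hp⟩
    refine ⟨?_, hp⟩
    by_cases hj1 : 1 ≤ j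
    · exact ⟨i, j, hi, hj1, by omega, rfl⟩
    · have hj0 : j = 0 := by omega
      have hi0 : i = 0 := by omega
      subst hj0; subst hi0
      refine ⟨student.length, student.length + 1, le_refl _, by omega, le_refl _, ?_⟩
      have h1 : student.length + 1 - student.length = 1 := by omega
      rw [h1]
      simp [List.drop_length]

-- ===== VERDICT (by name: the statement is the Claim_ definition above) =====
theorem solution_spec : Claim_equal_solution := by
  unfold Claim_equal_solution
  intro student k _
  unfold Spec_solution
  rw [pvA_eq, pvB_eq]
  split_ifs with hlt
  · rfl
  · have hperm : ((PySem.Set.ofList ((pvSA student).filter (pvP k))) : List (List Int)).Perm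
        (PySem.Set.ofList (pvSB student k)) :=
      (List.perm_ext_iff_of_nodup (PySem.Set.nodup_ofList _) (PySem.Set.nodup_ofList _)).mpr
        (fun a => by rw [PySem.Set.mem_ofList, PySem.Set.mem_ofList, pvSetsEq])
    rw [hperm.length_eq]
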